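-- pv_equiv track=rewrite | github.com/aaichert/html_snippets | html_snippets/table.py | create_fancy_table_header
-- ===== SOURCE A (Python) =====
-- def create_fancy_table_header(data):
--     """Helper function for fancy headers spanning two rows.
--     Example: html_table with "Position X" and "Position Y" and fance_header=True:
--                  | Position  |
--      | id  | foo | X   | Y   | bar | ...       |
--      |-----------------------------------------|
--      | ... | ... | ... | ... | ... |...        |
--
--     See also: collect_prefixes
--     """
--     header_html = "  <thead>\n    <tr>\n"
--     colgroup_html = '  <colgroup>\n'
--     colspan = 0
--
--     # Iterate over dictionary keys and values
--     for key, value in data.items():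
--         # If the value is not an empty list
--         if len(value) > 1:
--             # Calculate colspan and add the first row of headers
--             colspan = max(colspan, len(value))
--             colgroup_html += f"      <col span='{len(value)}'>\n"
--             header_html += f"       <th colspan='{len(value)}' style='border-bottom: 1px solid white;border-right: 1px solid white;'>{key.replace('_', ' ')}</th>\n"
--             value_no_prefix = [l[len(key):] for l in value]
--             value.clear()
--             value += value_no_prefix
--         else:
--             # Add an empty header for keys with an empty list value
--             header_html += "       <th colspan='1'></th>\n"
--             colgroup_html += f"    <col span='1'>\n"
--             value += [key]
--     colgroup_html += '  </colgroup>\n'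
--
--     header_html += "    </tr>\n    <tr  class='sortable_columns'>\n"
--
--     # Add the second row of headers
--     for key, value in data.items():
--         # If the value is not an empty list
--         if value:
--             for item in value:
--                 header_html += f"       <th>{item.replace('_', ' ')}</th>\n"
--         else:
--             # Add the key as a single column header
--             header_html += f"       <th>{key.replace('_', ' ')}</th>\n"
--
--     header_html += "    </tr>\n  </thead>\n"
--
--     return header_html, colgroup_html
-- ===== SOURCE B (Python) =====
-- def create_fancy_table_header(data):
--     """Declarative variant: a pure per-item renderer produces the triple
--     (first-row cell, col element, joined second-row cells) for each key while
--     applying the same in-place mutation to value; the three output streams are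
--     then assembled by transposing and joining the list of triples, with the
--     fixed tags wrapped around them."""
--     def cells(key, value):
--         if len(value) > 1:
--             n = len(value)
--             first = f"       <th colspan='{n}' style='border-bottom: 1px solid white;border-right: 1px solid white;'>{key.replace('_', ' ')}</th>\n"
--             col = f"      <col span='{n}'>\n"
--             stripped = [l[len(key):] for l in value]
--             value.clear()
--             value += stripped
--         else:
--             first = "       <th colspan='1'></th>\n"
--             col = "    <col span='1'>\n"
--             value += [key]
--         second = "".join(f"       <th>{item.replace('_', ' ')}</th>\n" for item in value)
--         return first, col, second
--
--     parts = [cells(key, value) for key, value in data.items()]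
--     firsts = "".join(p[0] for p in parts)
--     cols = "".join(p[1] for p in parts)
--     seconds = "".join(p[2] for p in parts)
--     header_html = ("  <thead>\n    <tr>\n" + firsts
--                    + "    </tr>\n    <tr  class='sortable_columns'>\n" + seconds
--                    + "    </tr>\n  </thead>\n")
--     colgroup_html = "  <colgroup>\n" + cols + "  </colgroup>\n"
--     return header_html, colgroup_html
-- ===== Notes on version B (the rewrite author's own statement) =====
-- stated objective: alternative
-- what changed: Replaces A's two imperative accumulator passes over data.items() with a pure per-item renderer producing a triple (first-row cell, col element, joined second-row cells) and a declarative transpose-and-join of the rendered triples, wrapping the fixed tags at the end (the unused colspan variable and A's dead empty-value branch are dropped); the same in-place mutation of values is preserved.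
import Mathlib
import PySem

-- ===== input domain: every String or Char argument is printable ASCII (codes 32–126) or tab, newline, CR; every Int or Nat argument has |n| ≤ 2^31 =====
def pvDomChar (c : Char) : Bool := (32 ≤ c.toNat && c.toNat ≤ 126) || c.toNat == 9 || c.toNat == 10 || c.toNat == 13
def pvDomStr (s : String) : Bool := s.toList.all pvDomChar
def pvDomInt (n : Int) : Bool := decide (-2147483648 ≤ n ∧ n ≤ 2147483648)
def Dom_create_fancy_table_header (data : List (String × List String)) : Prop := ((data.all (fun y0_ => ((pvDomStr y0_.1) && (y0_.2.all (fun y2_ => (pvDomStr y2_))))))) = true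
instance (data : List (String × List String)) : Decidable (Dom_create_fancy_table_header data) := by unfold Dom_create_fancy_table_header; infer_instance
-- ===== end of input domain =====

-- B replaces A's two imperative accumulator passes by a pure per-item renderer whose
-- triples are transposed and joined into the three output streams; objective: alternative.
-- Equivalence is about the RETURN value; both Pythons perform the same in-place
-- mutation of data's values.

-- ===== PORT A =====
-- key.replace('_', ' ')
def pvReplUS (key : String) : String := PySem.Str.replace key "_" " "

-- f"       <th>{item.replace('_', ' ')}</th>\n"
def pvTh2 (item : String) : String := "       <th>" ++ pvReplUS item ++ "</th>\n"

-- first for-loop of A: threads header_html, colgroup_html, colspan and rebuilds the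
-- (mutated) dict values in order
def pvA_loop1 : List (String × List String) → String → String → Int → String × String × List (String × List String)
  | [], h, c, _cs => (h, c, [])
  | (key, value) :: rest, h, c, cs =>
    if value.length > 1 then
      let cs' := max cs (value.length : Int)
      let c' := c ++ "      <col span='" ++ PySem.Int.toStr (value.length : Int) ++ "'>\n"
      let h' := h ++ "       <th colspan='" ++ PySem.Int.toStr (value.length : Int) ++ "' style='border-bottom: 1px solid white;border-right: 1px solid white;'>" ++ pvReplUS key ++ "</th>\n"
      -- value_no_prefix = [l[len(key):] for l in value]; value.clear(); value += value_no_prefix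
      let v' := value.map (fun l => PySem.Str.slice l (some (PySem.Str.len key)) none)
      let r := pvA_loop1 rest h' c' cs'
      (r.1, r.2.1, (key, v') :: r.2.2)
    else
      let h' := h ++ "       <th colspan='1'></th>\n"
      let c' := c ++ "    <col span='1'>\n"
      let r := pvA_loop1 rest h' c' cs
      (r.1, r.2.1, (key, value ++ [key]) :: r.2.2)

-- second for-loop of A, over the mutated dict
def pvA_loop2 : List (String × List String) → String → String
  | [], h => h
  | (key, value) :: rest, h =>
    if value.isEmpty then pvA_loop2 rest (h ++ pvTh2 key)
    else pvA_loop2 rest (value.foldl (fun hh item => hh ++ pvTh2 item) h)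

def create_fancy_table_header (data : List (String × List String)) : String × String :=
  let r := pvA_loop1 data "  <thead>\n    <tr>\n" "  <colgroup>\n" 0
  let colgroup_html := r.2.1 ++ "  </colgroup>\n"
  let header_html := r.1 ++ "    </tr>\n    <tr  class='sortable_columns'>\n"
  let header_html := pvA_loop2 r.2.2 header_html
  (header_html ++ "    </tr>\n  </thead>\n", colgroup_html)

-- ===== PORT B =====
-- ''.join ported as right-fold concatenation (exact for the empty separator)
def pvConcat : List String → String
  | [] => ""
  | a :: rest => a ++ pvConcat rest

-- B's per-item renderer cells(key, value): the three fragments for one key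
-- (the second component from the mutated value)
def pvB_cells (key : String) (value : List String) : String × String × String :=
  if value.length > 1 then
    let first := "       <th colspan='" ++ PySem.Int.toStr (value.length : Int) ++ "' style='border-bottom: 1px solid white;border-right: 1px solid white;'>" ++ pvReplUS key ++ "</th>\n"
    let col := "      <col span='" ++ PySem.Int.toStr (value.length : Int) ++ "'>\n"
    let stripped := value.map (fun l => PySem.Str.slice l (some (PySem.Str.len key)) none)
    (first, col, pvConcat (stripped.map pvTh2))
  else
    ("       <th colspan='1'></th>\n", "    <col span='1'>\n",
      pvConcat ((value ++ [key]).map pvTh2))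

-- parts = [cells(key, value) for key, value in data.items()]; then the three
-- streams are transposed out of parts and joined
def create_fancy_table_header_alt (data : List (String × List String)) : String × String :=
  let parts := data.map (fun kv => pvB_cells kv.1 kv.2)
  let firsts := pvConcat (parts.map (fun p => p.1))
  let cols := pvConcat (parts.map (fun p => p.2.1))
  let seconds := pvConcat (parts.map (fun p => p.2.2))
  ("  <thead>\n    <tr>\n" ++ firsts
      ++ "    </tr>\n    <tr  class='sortable_columns'>\n" ++ seconds
      ++ "    </tr>\n  </thead>\n",
   "  <colgroup>\n" ++ cols ++ "  </colgroup>\n")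

-- ===== PRECONDITION & SPEC =====
def Spec_create_fancy_table_header (data : List (String × List String)) (out : String × String) : Prop := out = create_fancy_table_header_alt data
instance (data : List (String × List String)) (out : String × String) : Decidable (Spec_create_fancy_table_header data out) := by unfold Spec_create_fancy_table_header; infer_instance

-- ===== CLAIM (what is proved, stated in full; the proofs are below) =====
def Claim_equal_create_fancy_table_header : Prop := ∀ (data : List (String × List String)), Dom_create_fancy_table_header data → Spec_create_fancy_table_header data (create_fancy_table_header data)

-- ===== LEMMAS AND PROOFS =====

-- proof helper: fused recursion computing B's three streams at once
def pvB_rec : List (String × List String) → String × String × String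
  | [] => ("", "", "")
  | (key, value) :: rest =>
    let fcs := pvB_cells key value
    let r := pvB_rec rest
    (fcs.1 ++ r.1, fcs.2.1 ++ r.2.1, fcs.2.2 ++ r.2.2)

theorem pvB_rec_eq (d : List (String × List String)) :
    pvB_rec d = (pvConcat ((d.map (fun kv => pvB_cells kv.1 kv.2)).map (fun p => p.1)),
                 pvConcat ((d.map (fun kv => pvB_cells kv.1 kv.2)).map (fun p => p.2.1)),
                 pvConcat ((d.map (fun kv => pvB_cells kv.1 kv.2)).map (fun p => p.2.2))) := by
  induction d with
  | nil => simp [pvB_rec, pvConcat]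
  | cons kv rest ih => simp [pvB_rec, ih, pvConcat]

theorem pvInnerFold (v : List String) (X : String) :
    v.foldl (fun hh item => hh ++ pvTh2 item) X = X ++ pvConcat (v.map pvTh2) := by
  induction v generalizing X with
  | nil => simp [pvConcat]
  | cons x xs ih => simp [List.foldl, ih, pvConcat, String.append_assoc]

-- joint characterisation of A's two loops by B's recursion
theorem pvMain (d : List (String × List String)) (h c : String) (cs : Int) (X : String) :
    (pvA_loop1 d h c cs).1 = h ++ (pvB_rec d).1 ∧
    (pvA_loop1 d h c cs).2.1 = c ++ (pvB_rec d).2.1 ∧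
    pvA_loop2 (pvA_loop1 d h c cs).2.2 X = X ++ (pvB_rec d).2.2 := by
  induction d generalizing h c cs X with
  | nil => simp [pvA_loop1, pvA_loop2, pvB_rec]
  | cons kv rest ih =>
    obtain ⟨key, value⟩ := kv
    by_cases hlen : value.length > 1
    · have hne : (value.map (fun l => PySem.Str.slice l (some (PySem.Str.len key)) none)) ≠ [] := by
        intro hnil; simp [List.map_eq_nil_iff] at hnil; simp [hnil] at hlen
      simp only [pvA_loop1, pvB_rec, pvB_cells, if_pos hlen]
      obtain ⟨ih1, ih2, ih3⟩ := ih (h ++ "       <th colspan='" ++ PySem.Int.toStr (value.length : Int) ++ "' style='border-bottom: 1px solid white;border-right: 1px solid white;'>" ++ pvReplUS key ++ "</th>\n")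
        (c ++ "      <col span='" ++ PySem.Int.toStr (value.length : Int) ++ "'>\n")
        (max cs (value.length : Int))
        (X ++ pvConcat ((value.map (fun l => PySem.Str.slice l (some (PySem.Str.len key)) none)).map pvTh2))
      refine ⟨?_, ?_, ?_⟩
      · simpa [String.append_assoc] using ih1
      · simpa [String.append_assoc] using ih2
      · simp only [pvA_loop2]
        rw [if_neg (by simp only [List.isEmpty_iff]; exact hne), pvInnerFold]
        simpa [String.append_assoc] using ih3
    · have hne : value ++ [key] ≠ [] := by simp
      simp only [pvA_loop1, pvB_rec, pvB_cells, if_neg hlen]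
      obtain ⟨ih1, ih2, ih3⟩ := ih (h ++ "       <th colspan='1'></th>\n")
        (c ++ "    <col span='1'>\n") cs
        (X ++ pvConcat ((value ++ [key]).map pvTh2))
      refine ⟨?_, ?_, ?_⟩
      · simpa [String.append_assoc] using ih1
      · simpa [String.append_assoc] using ih2
      · simp only [pvA_loop2]
        rw [if_neg (by simp only [List.isEmpty_iff]; exact hne), pvInnerFold]
        simpa [String.append_assoc] using ih3

-- ===== VERDICT (by name: the statement is the Claim_ definition above) =====
theorem create_fancy_table_header_spec : Claim_equal_create_fancy_table_header := by
  intro data _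
  unfold Spec_create_fancy_table_header
  rw [show create_fancy_table_header_alt data =
      ("  <thead>\n    <tr>\n" ++ (pvB_rec data).1
        ++ "    </tr>\n    <tr  class='sortable_columns'>\n" ++ (pvB_rec data).2.2
        ++ "    </tr>\n  </thead>\n",
       "  <colgroup>\n" ++ (pvB_rec data).2.1 ++ "  </colgroup>\n") from by
    simp [create_fancy_table_header_alt, pvB_rec_eq]]
  unfold create_fancy_table_header
  dsimp only
  obtain ⟨h1, h2, h3⟩ := pvMain data "  <thead>\n    <tr>\n" "  <colgroup>\n" 0
    ("  <thead>\n    <tr>\n" ++ (pvB_rec data).1 ++ "    </tr>\n    <tr  class='sortable_columns'>\n")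
  rw [h2]
  rw [show (pvA_loop1 data "  <thead>\n    <tr>\n" "  <colgroup>\n" 0).1 ++ "    </tr>\n    <tr  class='sortable_columns'>\n" = "  <thead>\n    <tr>\n" ++ (pvB_rec data).1 ++ "    </tr>\n    <tr  class='sortable_columns'>\n" from by rw [h1, String.append_assoc]]
  rw [h3]
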